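-- pv_equiv track=rewrite | github.com/blamedcloud/DnDStats | fighter_styles.py | get_num_attacks
-- ===== SOURCE A (Python) =====
-- def get_num_attacks(lvl):
--     extra_attacks = [5,11,20]
--     attacks = 1
--     for extra_atk in extra_attacks:
--         if lvl >= extra_atk:
--             attacks += 1
--         else:
--             break
--     return attacks
-- ===== SOURCE B (Python) =====
-- import bisect
--
-- def get_num_attacks(lvl):
--     return 1 + bisect.bisect_right([5, 11, 20], lvl)
-- ===== Notes on version B (the rewrite author's own statement) =====
-- stated objective: simpler
-- what changed: Replaced the accumulator loop with early break by a single closed-form bisect_right count of thresholds not exceeding lvl (valid because the thresholds are ascending).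
import Mathlib
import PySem

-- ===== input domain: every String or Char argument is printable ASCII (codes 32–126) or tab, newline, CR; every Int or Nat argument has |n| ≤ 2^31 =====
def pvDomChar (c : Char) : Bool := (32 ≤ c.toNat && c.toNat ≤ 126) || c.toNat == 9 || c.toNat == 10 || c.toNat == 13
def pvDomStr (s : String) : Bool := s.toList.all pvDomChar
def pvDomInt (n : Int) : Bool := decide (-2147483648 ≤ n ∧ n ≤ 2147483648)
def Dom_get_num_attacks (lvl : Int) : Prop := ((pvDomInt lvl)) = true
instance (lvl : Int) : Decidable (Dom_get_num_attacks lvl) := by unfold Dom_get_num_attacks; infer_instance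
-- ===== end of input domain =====

-- ===== PORT A =====
-- B computes the attack count as 1 + bisect_right([5,11,20], lvl): a closed-form count
-- of the sorted thresholds not exceeding lvl, instead of A's break-loop (objective: simpler).
-- loop over the threshold list with early break, literally transliterated
def getNumAttacksLoop (lvl : Int) : List Int → Int → Int
  | [], attacks => attacks
  | t :: ts, attacks =>
      if lvl ≥ t then getNumAttacksLoop lvl ts (attacks + 1)
      else attacks

def get_num_attacks (lvl : Int) : Int := getNumAttacksLoop lvl [5, 11, 20] 1

-- ===== PORT B =====
-- bisect.bisect_right on a sorted list = number of elements ≤ lvl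
def get_num_attacks_alt (lvl : Int) : Int :=
  1 + (([5, 11, 20] : List Int).countP (fun t => t ≤ lvl))

-- ===== PRECONDITION & SPEC =====
def Spec_get_num_attacks (lvl : Int) (out : Int) : Prop := out = get_num_attacks_alt lvl
instance (lvl : Int) (out : Int) : Decidable (Spec_get_num_attacks lvl out) := by unfold Spec_get_num_attacks; infer_instance

-- ===== CLAIM (what is proved, stated in full; the proofs are below) =====
def Claim_equal_get_num_attacks : Prop := ∀ (lvl : Int), Dom_get_num_attacks lvl → Spec_get_num_attacks lvl (get_num_attacks lvl)

-- ===== LEMMAS AND PROOFS =====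

-- ===== VERDICT (by name: the statement is the Claim_ definition above) =====
theorem get_num_attacks_spec : Claim_equal_get_num_attacks := by
  intro lvl _
  unfold Spec_get_num_attacks get_num_attacks get_num_attacks_alt
  by_cases h5 : (5:Int) ≤ lvl <;> by_cases h11 : (11:Int) ≤ lvl <;> by_cases h20 : (20:Int) ≤ lvl <;>
    simp [getNumAttacksLoop, List.countP, List.countP.go, *, ge_iff_le] <;> omega
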